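-- pv_equiv track=rewrite | github.com/singinglia/Variable_Pattern_Problem | BWT_assemble.py | concatInclusion
-- ===== SOURCE A (Python) =====
-- def concatInclusion(inList):
--     start = 0
--     text = ""
--     startPos = []
--     for i in inList:
--         startPos.append(start)
--         start += len(i)
--         text = text + i
--     return text, startPos
-- ===== SOURCE B (Python) =====
-- def concatInclusion(inList):
--     # lengths first, then offsets as exclusive prefix sums (inclusive sums, drop the last),
--     # and the text by a single join
--     lengths = [len(s) for s in inList]
--     acc = [0]
--     for L in lengths:
--         acc.append(acc[-1] + L)
--     startPos = acc[:-1]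
--     return "".join(inList), startPos
-- ===== Notes on version B (the rewrite author's own statement) =====
-- stated objective: idiomatic
-- what changed: Replaces the single accumulator-threading loop (offset counter + repeated string concatenation) with two differently-shaped passes: a lengths list whose inclusive prefix sums (last one dropped) give the start offsets, and a single ''.join for the text.
import Mathlib
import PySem

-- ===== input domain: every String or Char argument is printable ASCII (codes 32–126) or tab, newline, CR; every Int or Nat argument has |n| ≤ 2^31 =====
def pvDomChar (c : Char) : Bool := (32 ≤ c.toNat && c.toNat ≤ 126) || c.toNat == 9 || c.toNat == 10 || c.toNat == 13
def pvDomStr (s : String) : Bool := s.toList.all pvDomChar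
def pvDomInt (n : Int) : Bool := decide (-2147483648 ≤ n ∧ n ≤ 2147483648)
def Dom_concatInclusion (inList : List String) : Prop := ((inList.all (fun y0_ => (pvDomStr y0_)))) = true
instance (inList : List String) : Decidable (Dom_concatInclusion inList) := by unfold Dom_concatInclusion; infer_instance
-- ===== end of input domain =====

-- B replaces A's single accumulator-threading loop by a lengths pass, inclusive prefix sums
-- with the last dropped, and one join (objective: idiomatic; return value proved equal).

-- ===== PORT A =====
def concatInclusionGo : List String → Int → String → List Int → String × List Int
  | [], _start, text, startPos => (text, startPos)
  | i :: rest, start, text, startPos =>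
      concatInclusionGo rest (start + PySem.Str.len i) (text ++ i) (startPos ++ [start])

def concatInclusion (inList : List String) : String × List Int :=
  concatInclusionGo inList 0 "" []

-- ===== PORT B =====
-- acc[-1] is PySem.List.pyGet? acc (-1); the .getD 0 only totalises it (acc is never empty)
def concatInclusion_alt (inList : List String) : String × List Int :=
  let lengths := inList.map (fun s => PySem.Str.len s)
  let acc := lengths.foldl (fun a L => a ++ [(PySem.List.pyGet? a (-1)).getD 0 + L]) [(0 : Int)]
  let startPos := PySem.List.slice acc none (some (-1))
  (PySem.Str.join "" inList, startPos)

-- ===== PRECONDITION & SPEC =====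
def Spec_concatInclusion (inList : List String) (out : String × List Int) : Prop := out = concatInclusion_alt inList
instance (inList : List String) (out : String × List Int) : Decidable (Spec_concatInclusion inList out) := by unfold Spec_concatInclusion; infer_instance

-- ===== CLAIM (what is proved, stated in full; the proofs are below) =====
def Claim_equal_concatInclusion : Prop := ∀ (inList : List String), Dom_concatInclusion inList → Spec_concatInclusion inList (concatInclusion inList)

-- ===== LEMMAS AND PROOFS =====
-- the exclusive prefix sums of the lengths, starting at s
def pvOffs : List String → Int → List Int
  | [], _ => []
  | x :: xs, s => s :: pvOffs xs (s + PySem.Str.len x)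

theorem pv_join_cons (x : String) (xs : List String) :
    PySem.Str.join "" (x :: xs) = x ++ PySem.Str.join "" xs := by
  cases xs with
  | nil => simp [PySem.Str.join, PySem.Chars.join, List.intercalate]
  | cons y ys => simp [PySem.Str.join, PySem.Chars.join, List.intercalate]

theorem pv_goA (l : List String) : ∀ (start : Int) (text : String) (pos : List Int),
    concatInclusionGo l start text pos = (text ++ PySem.Str.join "" l, pos ++ pvOffs l start) := by
  induction l with
  | nil => intro start text pos; simp [concatInclusionGo, pvOffs, PySem.Str.join, PySem.Chars.join, List.intercalate]
  | cons x xs ih =>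
      intro start text pos
      simp [concatInclusionGo, ih, pvOffs, pv_join_cons, String.append_assoc]

theorem pv_foldB (l : List String) : ∀ (pos : List Int) (s : Int), ∃ t : Int,
    (l.map (fun s => PySem.Str.len s)).foldl
      (fun a L => a ++ [(PySem.List.pyGet? a (-1)).getD 0 + L]) (pos ++ [s])
      = (pos ++ pvOffs l s) ++ [t] := by
  induction l with
  | nil => intro pos s; exact ⟨s, by simp [pvOffs]⟩
  | cons x xs ih =>
      intro pos s
      obtain ⟨t, ht⟩ := ih (pos ++ [s]) (s + PySem.Str.len x)
      refine ⟨t, ?_⟩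
      simp only [PySem.List.pyGet?_neg_one] at ht ⊢
      simp only [List.map_cons, List.foldl_cons]
      rw [show (pos ++ [s]).getLast? = some s from by simp]
      simpa [pvOffs] using ht

theorem concatInclusion_eq (inList : List String) :
    concatInclusion inList = concatInclusion_alt inList := by
  obtain ⟨t, ht⟩ := pv_foldB inList [] 0
  simp at ht
  simp [concatInclusion, concatInclusion_alt, pv_goA, PySem.List.slice_to_neg_one, ht]

-- ===== VERDICT (by name: the statement is the Claim_ definition above) =====
theorem concatInclusion_spec : Claim_equal_concatInclusion := by
  intro inList _
  unfold Spec_concatInclusion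
  exact concatInclusion_eq inList
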